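-- pv_equiv track=rewrite | github.com/richardfearn/advent-of-code-2021 | day23/__init__.py | find_room_position_for_amphipod
-- ===== SOURCE A (Python) =====
-- def find_room_position_for_amphipod(amphipod, room):
--     if "." not in set(room):
--         # Room is full
--         return None
--
--     if set(room) == {"."}:
--         # Room is empty
--         return len(room) - 1
--
--     # Find first occupied position in the room
--     room_pos = 0
--     while room[room_pos] == ".":
--         room_pos += 1
--
--     # If room is only occupied by amphipods of the same type,
--     # amphipod can enter the room
--     if set(room[room_pos:]) == {amphipod}:
--         return room_pos - 1
--
--     # Room is occupied by amphipod(s) that shouldn't be there, so the correct amphipod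
--     # cannot move into the room yet
--     return None
-- ===== SOURCE B (Python) =====
-- def find_room_position_for_amphipod(amphipod, room):
--     # Scan from the back for the last empty cell.
--     last = None
--     for i in range(len(room) - 1, -1, -1):
--         if room[i] == ".":
--             last = i
--             break
--     if last is None:
--         # No empty cell: room is full
--         return None
--     # Enterable iff everything behind the last empty cell is the right
--     # amphipod and everything before it is empty.
--     if all(c == amphipod for c in room[last + 1:]) and all(c == "." for c in room[:last]):
--         return last
--     return None
-- ===== Notes on version B (the rewrite author's own statement) =====
-- stated objective: alternative
-- what changed: Replaces A's three set constructions plus a forward while-loop with a single backward scan for the last empty cell followed by two segment checks, folding the empty-room and full-room guard clauses into one uniform rule.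
import Mathlib
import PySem

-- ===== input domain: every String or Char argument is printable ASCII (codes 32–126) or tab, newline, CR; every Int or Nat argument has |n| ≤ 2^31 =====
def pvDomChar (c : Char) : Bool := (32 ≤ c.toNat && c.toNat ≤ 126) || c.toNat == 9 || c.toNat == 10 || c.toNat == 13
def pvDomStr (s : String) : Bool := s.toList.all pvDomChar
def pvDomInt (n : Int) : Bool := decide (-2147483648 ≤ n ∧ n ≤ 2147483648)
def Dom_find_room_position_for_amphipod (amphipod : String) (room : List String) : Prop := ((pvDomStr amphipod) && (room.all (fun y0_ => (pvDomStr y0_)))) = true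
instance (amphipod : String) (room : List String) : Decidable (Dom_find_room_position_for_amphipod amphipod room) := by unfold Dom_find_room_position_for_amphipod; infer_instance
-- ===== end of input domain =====

-- B replaces A's set constructions and forward while-loop by a backward scan for the
-- last empty cell plus two segment checks (objective: alternative decomposition).

-- ===== PORT A =====
-- 'while room[room_pos] == ".": room_pos += 1' — scans from index i over the remaining
-- cells; the callers of A only reach it when a non-"." cell exists, so the [] case is
-- unreachable there (Python would raise IndexError; exact on inputs where the loop stops).
def pyFirstOccupied (l : List String) (i : Nat) : Nat :=
  match l with
  | [] => i
  | h :: t => if h == "." then pyFirstOccupied t (i + 1) else i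

def find_room_position_for_amphipod (amphipod : String) (room : List String) : Option Int :=
  if ¬ (PySem.Set.contains (PySem.Set.ofList room) "." = true) then
    none
  else if PySem.Set.equal (PySem.Set.ofList room) (PySem.Set.ofList ["."]) then
    some ((room.length : Int) - 1)
  else
    let room_pos := pyFirstOccupied room 0
    if PySem.Set.equal (PySem.Set.ofList (room.drop room_pos)) (PySem.Set.ofList [amphipod]) then
      some ((room_pos : Int) - 1)
    else
      none

-- ===== PORT B =====
-- backward scan for the index of the last "." (B's reversed range loop with break)
def lastEmpty (l : List String) : Option Nat :=
  match l with
  | [] => none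
  | h :: t =>
    match lastEmpty t with
    | some j => some (j + 1)
    | none => if h == "." then some 0 else none

def find_room_position_for_amphipod_alt (amphipod : String) (room : List String) : Option Int :=
  match lastEmpty room with
  | none => none
  | some last =>
    if (room.drop (last + 1)).all (fun c => c == amphipod)
        && (room.take last).all (fun c => c == ".") then
      some (last : Int)
    else
      none

-- ===== PRECONDITION & SPEC =====
def Spec_find_room_position_for_amphipod (amphipod : String) (room : List String) (out : Option Int) : Prop := out = find_room_position_for_amphipod_alt amphipod room
instance (amphipod : String) (room : List String) (out : Option Int) : Decidable (Spec_find_room_position_for_amphipod amphipod room out) := by unfold Spec_find_room_position_for_amphipod; infer_instance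

-- ===== CLAIM (what is proved, stated in full; the proofs are below) =====
def Claim_equal_find_room_position_for_amphipod : Prop := ∀ (amphipod : String) (room : List String), Dom_find_room_position_for_amphipod amphipod room → Spec_find_room_position_for_amphipod amphipod room (find_room_position_for_amphipod amphipod room)

-- ===== LEMMAS AND PROOFS =====

theorem lastEmpty_eq_none_iff (l : List String) : lastEmpty l = none ↔ "." ∉ l := by
  induction l with
  | nil => simp [lastEmpty]
  | cons h t ih =>
    simp only [lastEmpty]
    cases ht : lastEmpty t with
    | some j => simp [ht] at ih; simp [ih]
    | none =>
      rw [ht] at ih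
      by_cases hh : h = "."
      · simp [hh]
      · have h2 : ¬("." = h) := fun hc => hh hc.symm
        simp [hh, ih.mp rfl, h2]

theorem lastEmpty_append_no_dot (xs ys : List String) (h : "." ∉ ys) :
    lastEmpty (xs ++ ys) = lastEmpty xs := by
  induction xs with
  | nil =>
    simp only [List.nil_append]
    rw [show lastEmpty [] = none from rfl]
    exact (lastEmpty_eq_none_iff ys).mpr h
  | cons x t ih => simp only [List.cons_append, lastEmpty, ih]

theorem lastEmpty_dots (xs : List String) (hne : xs ≠ []) (h : ∀ x ∈ xs, x = ".") :
    lastEmpty xs = some (xs.length - 1) := by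
  induction xs with
  | nil => exact absurd rfl hne
  | cons x t ih =>
    by_cases hte : t = []
    · subst hte
      simp [lastEmpty, h x (by simp)]
    · have := ih hte (fun y hy => h y (List.mem_cons_of_mem _ hy))
      simp only [lastEmpty, this]
      have : t.length ≠ 0 := fun hc => hte (List.eq_nil_of_length_eq_zero hc)
      simp; omega

theorem lastEmpty_append_some (xs ys : List String) (j : Nat) (h : lastEmpty ys = some j) :
    lastEmpty (xs ++ ys) = some (xs.length + j) := by
  induction xs with
  | nil => simpa using h
  | cons x t ih => simp only [List.cons_append, lastEmpty, ih]; simp; omega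

theorem pyFirstOccupied_spec (dots : List String) (y : String) (rest : List String)
    (hd : ∀ x ∈ dots, x = ".") (hy : y ≠ ".") (i : Nat) :
    pyFirstOccupied (dots ++ y :: rest) i = i + dots.length := by
  induction dots generalizing i with
  | nil => simp [pyFirstOccupied, hy]
  | cons d t ih =>
    have hd' : d = "." := hd d (by simp)
    simp only [List.cons_append, pyFirstOccupied, hd', beq_self_eq_true, if_true]
    rw [ih (fun x hx => hd x (List.mem_cons_of_mem _ hx)) (i + 1)]
    simp; omega

theorem split_at_first_non_dot (r : List String) (h : ∃ x ∈ r, x ≠ ".") :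
    ∃ dots y rest, r = dots ++ y :: rest ∧ (∀ x ∈ dots, x = ".") ∧ y ≠ "." := by
  induction r with
  | nil => simp at h
  | cons a t ih =>
    by_cases ha : a = "."
    · obtain ⟨x, hx, hxne⟩ := h
      have hxt : x ∈ t := by
        rcases List.mem_cons.mp hx with rfl | hm
        · exact absurd ha hxne
        · exact hm
      obtain ⟨dots, y, rest, hr, hdots, hy⟩ := ih ⟨x, hxt, hxne⟩
      exact ⟨a :: dots, y, rest, by simp [hr], by
        intro z hz
        rcases List.mem_cons.mp hz with rfl | hm
        · exact ha
        · exact hdots z hm, hy⟩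
    · exact ⟨[], a, t, rfl, by simp, ha⟩

theorem set_equal_singleton (l : List String) (a : String) :
    PySem.Set.equal (PySem.Set.ofList l) (PySem.Set.ofList [a]) = true ↔
      (∀ x ∈ l, x = a) ∧ a ∈ l := by
  rw [PySem.Set.equal_iff]
  constructor
  · intro h
    constructor
    · intro x hx
      have := (h x).mp (by simpa [PySem.Set.mem_ofList] using hx)
      simpa [PySem.Set.mem_ofList] using this
    · have : a ∈ PySem.Set.ofList l := (h a).mpr (by simp [PySem.Set.mem_ofList])
      simpa [PySem.Set.mem_ofList] using this
  · rintro ⟨hall, hmem⟩ x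
    simp only [PySem.Set.mem_ofList, List.mem_singleton]
    exact ⟨fun hx => hall x hx, fun hx => hx ▸ hmem⟩

theorem alt_some (amphipod : String) (room : List String) (k : Nat)
    (h : lastEmpty room = some k) :
    find_room_position_for_amphipod_alt amphipod room =
      if ((room.drop (k + 1)).all (fun c => c == amphipod)
          && (room.take k).all (fun c => c == ".")) then some (k : Int) else none := by
  unfold find_room_position_for_amphipod_alt
  rw [h]

theorem alt_none (amphipod : String) (room : List String)
    (h : lastEmpty room = none) :
    find_room_position_for_amphipod_alt amphipod room = none := by
  unfold find_room_position_for_amphipod_alt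
  rw [h]

-- main equivalence, as a plain equality of the two ports
theorem ports_agree (amphipod : String) (room : List String) :
    find_room_position_for_amphipod amphipod room =
      find_room_position_for_amphipod_alt amphipod room := by
  by_cases hdot : "." ∈ room
  · -- room contains an empty cell
    by_cases hall : ∀ x ∈ room, x = "."
    · -- room is all dots (A's "empty room" branch)
      have hne : room ≠ [] := by rintro rfl; simp at hdot
      have hA : find_room_position_for_amphipod amphipod room
          = some ((room.length : Int) - 1) := by
        unfold find_room_position_for_amphipod
        rw [if_neg (by simp [PySem.Set.mem_ofList, hdot]),
            if_pos ((set_equal_singleton room ".").mpr ⟨hall, hdot⟩)]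
      have hlen : room.length ≠ 0 := fun hc => hne (List.eq_nil_of_length_eq_zero hc)
      have hB : find_room_position_for_amphipod_alt amphipod room
          = some ((room.length : Int) - 1) := by
        rw [alt_some amphipod room (room.length - 1) (lastEmpty_dots room hne hall)]
        have h1 : room.drop (room.length - 1 + 1) = [] := by
          apply List.drop_eq_nil_of_le; omega
        rw [if_pos]
        · congr 1; omega
        · simp only [h1, List.all_nil, Bool.true_and, List.all_eq_true]
          intro c hc
          simp [hall c (List.mem_of_mem_take hc)]
      rw [hA, hB]
    · -- room has an occupied cell
      push Not at hall
      obtain ⟨dots, y, rest, hr, hdots, hy⟩ := split_at_first_non_dot room hall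
      have hy' : ¬ (y ∈ (["."] : List String)) := by simpa using hy
      have hnotempty : ¬ PySem.Set.equal (PySem.Set.ofList room) (PySem.Set.ofList ["."]) = true := by
        intro h
        exact hy (((set_equal_singleton room ".").mp h).1 y (by simp [hr]))
      have hp : pyFirstOccupied room 0 = dots.length := by
        rw [hr, pyFirstOccupied_spec dots y rest hdots hy 0]; omega
      have hdrop : room.drop dots.length = y :: rest := by
        rw [hr]; simp
      have hA1 : find_room_position_for_amphipod amphipod room =
          if PySem.Set.equal (PySem.Set.ofList (y :: rest)) (PySem.Set.ofList [amphipod]) then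
            some ((dots.length : Int) - 1) else none := by
        unfold find_room_position_for_amphipod
        rw [if_neg (by simp [PySem.Set.mem_ofList, hdot]),
            if_neg hnotempty]
        simp only [hp, hdrop]
      by_cases hCA : ∀ x ∈ y :: rest, x = amphipod
      · -- A enters: suffix from first occupied is all `amphipod`
        have hamem : amphipod ∈ y :: rest := (hCA y (by simp)) ▸ (by simp)
        have hane : amphipod ≠ "." := by
          have := hCA y (by simp); rw [← this]; exact hy
        have hdotin : "." ∈ dots := by
          have : "." ∉ y :: rest := by
            intro hc; exact hane ((hCA _ hc).symm)
          rw [hr] at hdot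
          rcases List.mem_append.mp hdot with h1 | h2
          · exact h1
          · exact absurd h2 this
        have hdne : dots ≠ [] := by rintro rfl; simp at hdotin
        have hdlen : dots.length ≠ 0 := fun hc => hdne (List.eq_nil_of_length_eq_zero hc)
        have hlast : lastEmpty room = some (dots.length - 1) := by
          rw [hr, lastEmpty_append_no_dot dots (y :: rest)
              (fun hc => hane ((hCA _ hc).symm)),
              lastEmpty_dots dots hdne hdots]
        have hB : find_room_position_for_amphipod_alt amphipod room
            = some ((dots.length : Int) - 1) := by
          rw [alt_some amphipod room (dots.length - 1) hlast]
          have hd1 : dots.length - 1 + 1 = dots.length := by omega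
          rw [if_pos]
          · congr 1; omega
          · rw [hd1, hdrop]
            simp only [Bool.and_eq_true, List.all_eq_true, beq_iff_eq]
            constructor
            · exact fun c hc => hCA c hc
            · intro c hc
              exact hdots c (by
                rw [hr] at hc
                exact List.mem_of_mem_take (by simpa [List.take_append_of_le_length (by omega : dots.length - 1 ≤ dots.length)] using hc))
        rw [hA1, if_pos ((set_equal_singleton (y :: rest) amphipod).mpr ⟨hCA, hamem⟩), hB]
      · -- A rejects
        have hAnone : find_room_position_for_amphipod amphipod room = none := by
          rw [hA1, if_neg]
          intro h
          exact hCA ((set_equal_singleton (y :: rest) amphipod).mp h).1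
        push Not at hCA
        obtain ⟨z, hz, hzne⟩ := hCA
        by_cases hdsuf : "." ∈ y :: rest
        · -- a dot lies behind the first occupied cell: B's prefix check fails
          obtain ⟨j, hj⟩ : ∃ j, lastEmpty (y :: rest) = some j := by
            cases hle : lastEmpty (y :: rest) with
            | some j => exact ⟨j, rfl⟩
            | none => exact absurd ((lastEmpty_eq_none_iff _).mp hle) (by simp [hdsuf])
          have hj1 : 1 ≤ j := by
            rcases Nat.eq_zero_or_pos j with rfl | h
            · exfalso
              simp only [lastEmpty] at hj
              cases hle : lastEmpty rest with
              | some k => rw [hle] at hj; simp at hj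
              | none =>
                rw [hle] at hj
                by_cases hyd : y = "."
                · exact hy hyd
                · simp [hyd] at hj
            · exact h
          have hlast : lastEmpty room = some (dots.length + j) := by
            rw [hr]; exact lastEmpty_append_some dots (y :: rest) j hj
          have hytake : y ∈ room.take (dots.length + j) := by
            rw [hr, List.take_append]
            refine List.mem_append.mpr (Or.inr ?_)
            have : dots.length + j - dots.length = j := by omega
            rw [this]
            cases j with
            | zero => omega
            | succ n => simp [List.take_succ_cons]
          rw [alt_some amphipod room (dots.length + j) hlast, if_neg, hAnone]
          simp only [Bool.and_eq_true, List.all_eq_true, beq_iff_eq, not_and]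
          intro _ hc
          exact hy (hc y hytake)
        · -- no dot behind the first occupied cell: B's suffix check fails
          have hdotin : "." ∈ dots := by
            rw [hr] at hdot
            rcases List.mem_append.mp hdot with h1 | h2
            · exact h1
            · exact absurd h2 hdsuf
          have hdne : dots ≠ [] := by rintro rfl; simp at hdotin
          have hdlen : dots.length ≠ 0 := fun hc => hdne (List.eq_nil_of_length_eq_zero hc)
          have hlast : lastEmpty room = some (dots.length - 1) := by
            rw [hr, lastEmpty_append_no_dot dots (y :: rest) hdsuf,
                lastEmpty_dots dots hdne hdots]
          rw [alt_some amphipod room (dots.length - 1) hlast, if_neg, hAnone]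
          have hd1 : dots.length - 1 + 1 = dots.length := by omega
          rw [hd1, hdrop]
          simp only [Bool.and_eq_true, List.all_eq_true, beq_iff_eq, not_and]
          intro hc
          exact absurd (hc z hz) hzne
  · -- no empty cell: both return none
    have hA : find_room_position_for_amphipod amphipod room = none := by
      unfold find_room_position_for_amphipod
      rw [if_pos (by simp [PySem.Set.mem_ofList, hdot])]
    have hB : find_room_position_for_amphipod_alt amphipod room = none :=
      alt_none amphipod room ((lastEmpty_eq_none_iff room).mpr hdot)
    rw [hA, hB]

-- ===== VERDICT (by name: the statement is the Claim_ definition above) =====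
theorem find_room_position_for_amphipod_spec : Claim_equal_find_room_position_for_amphipod := by
  intro amphipod room _
  unfold Spec_find_room_position_for_amphipod
  exact ports_agree amphipod room
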